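-- pv_equiv track=rewrite | github.com/mehhdiii/Travel-Planner | reading_file.py | list_of_stops
-- ===== SOURCE A (Python) =====
-- def list_of_stops(arr, trains):
--     '''returns all the list of stops currently in database'''
--     stops_in_database = []
--     for x in arr:
--         for y in x:
--             if type(y) == list and y[1] not in stops_in_database:
--
--                 stops_in_database.append(y[1])
--     stops_in_database.sort()
--     return stops_in_database
-- ===== SOURCE B (Python) =====
-- def list_of_stops(arr, trains):
--     '''returns all the list of stops currently in database'''
--     vals = [y[1] for x in arr for y in x if type(y) == list]
--     vals.sort()
--     res = []
--     for v in vals: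
--         if not res or res[-1] != v:
--             res.append(v)
--     return res
-- ===== Notes on version B (the rewrite author's own statement) =====
-- stated objective: faster
-- what changed: Replaces the per-element 'not in' membership scan over the growing result list by collecting all y[1] values with duplicates, one sort, and a single linear pass removing adjacent duplicates.
import Mathlib
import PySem

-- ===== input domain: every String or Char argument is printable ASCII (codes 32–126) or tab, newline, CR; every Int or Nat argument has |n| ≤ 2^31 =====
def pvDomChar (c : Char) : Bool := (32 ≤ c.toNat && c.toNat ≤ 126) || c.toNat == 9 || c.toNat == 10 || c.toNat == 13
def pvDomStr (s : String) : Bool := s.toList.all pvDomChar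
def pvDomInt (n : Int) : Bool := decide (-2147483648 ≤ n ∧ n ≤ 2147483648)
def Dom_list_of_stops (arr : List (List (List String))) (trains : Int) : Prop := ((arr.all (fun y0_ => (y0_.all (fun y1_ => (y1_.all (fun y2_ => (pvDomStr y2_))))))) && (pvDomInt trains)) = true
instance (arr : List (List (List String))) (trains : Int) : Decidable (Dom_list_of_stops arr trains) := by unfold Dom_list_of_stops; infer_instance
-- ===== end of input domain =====

-- B replaces A's quadratic 'not in' membership scans by collect-all / one sort / one adjacent-dedup pass.

-- ===== PORT A =====
-- 'type(y) == list' is always true under the typed domain (y : List String); y[1] with a default,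
-- exact under Pre_ (every inner list has length ≥ 2).
def list_of_stops (arr : List (List (List String))) (trains : Int) : List String :=
  let stops := arr.foldl (fun acc x =>
    x.foldl (fun acc y =>
      if PySem.List.pyGetD y 1 "" ∈ acc then acc
      else acc ++ [PySem.List.pyGetD y 1 ""]) acc) []
  PySem.List.sorted stops (fun s => s) false

-- ===== PORT B =====
def list_of_stops_alt (arr : List (List (List String))) (trains : Int) : List String :=
  let vals := arr.flatMap (fun x => x.map (fun y => PySem.List.pyGetD y 1 ""))
  let svals := PySem.List.sorted vals (fun s => s) false
  svals.foldl (fun res v =>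
    if res = [] || !(PySem.List.pyGetD res (-1) "" == v) then res ++ [v] else res) []

-- ===== PRECONDITION & SPEC =====
-- Pre_ excludes exactly the inputs where Python A raises IndexError: an inner entry y with len(y) < 2.
def Pre_list_of_stops (arr : List (List (List String))) (trains : Int) : Prop :=
  ∀ x ∈ arr, ∀ y ∈ x, 2 ≤ y.length
instance (arr : List (List (List String))) (trains : Int) : Decidable (Pre_list_of_stops arr trains) := by unfold Pre_list_of_stops; infer_instance

def pvWitness_list_of_stops : List (List (List String)) × Int :=
  ([[["a", "b"], ["c", "d"]], [["e", "b"]]], 0)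

def Spec_list_of_stops (arr : List (List (List String))) (trains : Int) (out : List String) : Prop := out = list_of_stops_alt arr trains
instance (arr : List (List (List String))) (trains : Int) (out : List String) : Decidable (Spec_list_of_stops arr trains out) := by unfold Spec_list_of_stops; infer_instance

-- ===== CLAIM (what is proved, stated in full; the proofs are below) =====
def Claim_equal_list_of_stops : Prop := ∀ (arr : List (List (List String))) (trains : Int), Dom_list_of_stops arr trains → Pre_list_of_stops arr trains → Spec_list_of_stops arr trains (list_of_stops arr trains)

-- ===== LEMMAS AND PROOFS =====

-- A's dedup-by-membership step and B's adjacent-dedup step, named for the proofs.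
def pvStepA (acc : List String) (v : String) : List String :=
  if v ∈ acc then acc else acc ++ [v]

def pvStepB (res : List String) (v : String) : List String :=
  if res = [] || !(PySem.List.pyGetD res (-1) "" == v) then res ++ [v] else res

-- nested fold over arr = fold over the flattened value list
theorem pv_fold_flat (f : List String → String → List String)
    (arr : List (List (List String))) (init : List String) :
    arr.foldl (fun acc x => x.foldl (fun acc y => f acc (PySem.List.pyGetD y 1 "")) acc) init
      = ((arr.flatMap (fun x => x.map (fun y => PySem.List.pyGetD y 1 ""))).foldl f init) := by
  induction arr generalizing init with
  | nil => rfl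
  | cons x t ih => simp [List.foldl_append, List.foldl_map, ih]

theorem pv_stepA_fold (l : List String) :
    ∀ acc : List String, acc.Nodup →
      (l.foldl pvStepA acc).Nodup ∧ ∀ a, a ∈ l.foldl pvStepA acc ↔ a ∈ acc ∨ a ∈ l := by
  induction l with
  | nil => intro acc h; simpa using h
  | cons v t ih =>
    intro acc h
    by_cases hv : v ∈ acc
    · have := ih acc h
      simp only [List.foldl_cons, pvStepA, if_pos hv]
      refine ⟨this.1, fun a => ?_⟩
      rw [(this.2 a)]
      constructor
      · rintro (ha | ha)
        · exact Or.inl ha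
        · exact Or.inr (List.mem_cons_of_mem _ ha)
      · rintro (ha | ha)
        · exact Or.inl ha
        · rcases List.mem_cons.mp ha with rfl | ha
          · exact Or.inl hv
          · exact Or.inr ha
    · have hnd : (acc ++ [v]).Nodup := by
        refine List.Nodup.append h (by simp) ?_
        intro a ha hb
        simp only [List.mem_singleton] at hb
        exact hv (hb ▸ ha)
      have := ih (acc ++ [v]) hnd
      simp only [List.foldl_cons, pvStepA, if_neg hv]
      refine ⟨this.1, fun a => ?_⟩
      rw [(this.2 a)]
      simp [or_assoc]

theorem pv_le_last_of_pairwise_lt :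
    ∀ (l : List String) (h : l ≠ []) (_ : l.Pairwise (· < ·)) (a : String), a ∈ l → a ≤ l.getLast h := by
  intro l
  induction l with
  | nil => intro h; exact absurd rfl h
  | cons b t ih =>
    intro h hp a ha
    cases t with
    | nil => simp at ha; simp [ha, List.getLast]
    | cons c s =>
      have hlast : (b :: c :: s).getLast h = (c :: s).getLast (by simp) := by
        simp [List.getLast]
      rw [hlast]
      rcases List.mem_cons.mp ha with rfl | ha
      · have : a < (c :: s).getLast (by simp) :=
          (List.pairwise_cons.mp hp).1 _ (List.getLast_mem _)
        exact le_of_lt this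
      · exact ih (by simp) (List.pairwise_cons.mp hp).2 a ha

theorem pv_stepB_fold (l : List String) :
    ∀ acc : List String, l.Pairwise (· ≤ ·) → acc.Pairwise (· < ·) →
      (∀ a ∈ acc, ∀ b ∈ l, a ≤ b) →
      (l.foldl pvStepB acc).Pairwise (· < ·) ∧
        ∀ a, a ∈ l.foldl pvStepB acc ↔ a ∈ acc ∨ a ∈ l := by
  induction l with
  | nil => intro acc _ h _; simpa using h
  | cons v t ih =>
    intro acc hl hacc hle
    have hv : ∀ b ∈ t, v ≤ b := (List.pairwise_cons.mp hl).1
    have ht : t.Pairwise (· ≤ ·) := (List.pairwise_cons.mp hl).2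
    by_cases hc : acc = [] ∨ ¬ (PySem.List.pyGetD acc (-1) "" = v)
    · -- append branch
      have hstep : pvStepB acc v = acc ++ [v] := by
        rcases hc with hc | hc <;> simp [pvStepB, hc]
      have hltv : ∀ a ∈ acc, a < v := by
        intro a ha
        have hne : acc ≠ [] := fun hn => by simp [hn] at ha
        have hlastv : PySem.List.pyGetD acc (-1) "" = acc.getLast hne :=
          PySem.List.pyGetD_neg_one acc "" hne
        have hlv : acc.getLast hne ≠ v := by
          rcases hc with hc | hc
          · exact absurd hc hne
          · rw [hlastv] at hc; exact hc
        have h1 : a ≤ acc.getLast hne := pv_le_last_of_pairwise_lt acc hne hacc a ha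
        have h2 : acc.getLast hne ≤ v := hle _ (List.getLast_mem hne) v (by simp)
        exact lt_of_le_of_lt h1 (lt_of_le_of_ne h2 hlv)
      have hacc' : (acc ++ [v]).Pairwise (· < ·) := by
        rw [List.pairwise_append]
        exact ⟨hacc, by simp, by simpa using hltv⟩
      have hle' : ∀ a ∈ acc ++ [v], ∀ b ∈ t, a ≤ b := by
        intro a ha b hb
        rcases List.mem_append.mp ha with ha | ha
        · exact hle a ha b (by simp [hb])
        · simp at ha; exact ha ▸ hv b hb
      have := ih (acc ++ [v]) ht hacc' hle'
      simp only [List.foldl_cons, hstep]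
      refine ⟨this.1, fun a => ?_⟩
      rw [this.2 a]; simp [or_assoc]
    · -- skip branch: acc nonempty and its last element is v
      rw [not_or, not_not] at hc
      obtain ⟨hne, hlast⟩ := hc
      have hstep : pvStepB acc v = acc := by
        simp [pvStepB, hne, hlast]
      have hvmem : v ∈ acc := by
        have := PySem.List.pyGetD_neg_one acc "" hne
        rw [this] at hlast
        exact hlast ▸ List.getLast_mem hne
      have hle' : ∀ a ∈ acc, ∀ b ∈ t, a ≤ b := fun a ha b hb => hle a ha b (by simp [hb])
      have := ih acc ht hacc hle'
      simp only [List.foldl_cons, hstep]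
      refine ⟨this.1, fun a => ?_⟩
      rw [this.2 a]
      constructor
      · rintro (ha | ha)
        · exact Or.inl ha
        · exact Or.inr (List.mem_cons_of_mem _ ha)
      · rintro (ha | ha)
        · exact Or.inl ha
        · rcases List.mem_cons.mp ha with rfl | ha
          · exact Or.inl hvmem
          · exact Or.inr ha

-- ===== VERDICT (by name: the statement is the Claim_ definition above) =====
theorem list_of_stops_spec : Claim_equal_list_of_stops := by
  intro arr trains _ _
  unfold Spec_list_of_stops list_of_stops list_of_stops_alt
  show PySem.List.sorted (arr.foldl (fun acc x =>
      x.foldl (fun acc y =>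
        if PySem.List.pyGetD y 1 "" ∈ acc then acc
        else acc ++ [PySem.List.pyGetD y 1 ""]) acc) []) (fun s => s) false
    = List.foldl pvStepB []
        (PySem.List.sorted (arr.flatMap (fun x => x.map (fun y => PySem.List.pyGetD y 1 ""))) (fun s => s) false)
  set vals := arr.flatMap (fun x => x.map (fun y => PySem.List.pyGetD y 1 "")) with hvals
  have hA : arr.foldl (fun acc x =>
      x.foldl (fun acc y =>
        if PySem.List.pyGetD y 1 "" ∈ acc then acc
        else acc ++ [PySem.List.pyGetD y 1 ""]) acc) []
      = vals.foldl pvStepA [] := by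
    rw [hvals, ← pv_fold_flat pvStepA arr []]
    rfl
  rw [hA]
  set S := vals.foldl pvStepA [] with hS
  set SV := PySem.List.sorted vals (fun s => s) false with hSV
  set R := SV.foldl pvStepB [] with hR
  have hAprops := pv_stepA_fold vals [] (by simp)
  have hSVp : SV.Pairwise (· ≤ ·) := by
    have := PySem.List.sorted_pairwise vals (fun s => s)
    simpa using this
  have hBprops := pv_stepB_fold SV [] hSVp (by simp) (by simp)
  have hRmem : ∀ a, a ∈ R ↔ a ∈ vals := by
    intro a
    rw [← hR] at hBprops
    rw [hBprops.2 a]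
    simp [hSV, PySem.List.mem_sorted]
  have hRnd : R.Nodup := hBprops.1.imp ne_of_lt
  have hSnd : S.Nodup := hAprops.1
  have hperm : R.Perm S := by
    rw [List.perm_ext_iff_of_nodup hRnd hSnd]
    intro a
    rw [hRmem a, hAprops.2 a]
    simp
  exact PySem.List.sorted_eq_of_perm_of_pairwise_lt S R (fun s => s) hperm hBprops.1
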